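-- pv_equiv track=rewrite | github.com/anupadkh/Drug-Protein-Interation | m_NGSG.py | noise_pos
-- ===== SOURCE A (Python) =====
-- def noise_pos(feature, thres):
--     """
--     This function is for creating position list
--     The list contains those features occurs less than given number
--     """
--     n_pos = []
--     for i in range(len(feature[0][1])):
--         max_num = 0
--         count = 0
--         for j in range(len(feature)):
--             max_num = max(feature[j][1][i], max_num)
--             count += feature[j][1][i]
--         if max_num < thres:
--             n_pos.append(i)
--     return n_pos
-- ===== SOURCE B (Python) =====
-- def noise_pos(feature, thres):
--     # Sieve: start with all column positions as candidates and eliminate a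
--     # position as soon as some row reaches the threshold there; no per-column
--     # max is ever computed, and the scan stops early once nothing survives.
--     candidates = list(range(len(feature[0][1])))
--     if thres <= 0:
--         return []
--     for _key, counts in feature:
--         if not candidates:
--             break
--         candidates = [i for i in candidates if counts[i] < thres]
--     return candidates
-- ===== Notes on version B (the rewrite author's own statement) =====
-- stated objective: alternative
-- what changed: Replaced the per-column max computation by a sieve: start with every position as a candidate, eliminate a position as soon as some row's count reaches the threshold (with a thres<=0 shortcut and an early break once no candidate survives); no maximum is ever computed.
import Mathlib
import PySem

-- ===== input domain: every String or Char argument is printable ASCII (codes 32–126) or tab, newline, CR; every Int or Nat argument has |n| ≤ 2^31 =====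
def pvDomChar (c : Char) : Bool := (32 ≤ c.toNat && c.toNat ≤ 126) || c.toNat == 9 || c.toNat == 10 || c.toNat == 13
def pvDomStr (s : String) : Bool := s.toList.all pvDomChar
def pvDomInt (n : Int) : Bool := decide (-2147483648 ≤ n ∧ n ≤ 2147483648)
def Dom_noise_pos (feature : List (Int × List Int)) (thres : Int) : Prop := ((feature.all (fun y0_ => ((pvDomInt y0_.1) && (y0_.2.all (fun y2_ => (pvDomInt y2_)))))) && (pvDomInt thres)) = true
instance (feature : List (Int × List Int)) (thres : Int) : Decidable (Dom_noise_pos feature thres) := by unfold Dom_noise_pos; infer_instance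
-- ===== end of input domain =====

-- B replaces the per-column max computation by a candidate sieve (eliminate a position
-- when a row reaches the threshold, early exit when none survives); same return value
-- as A on Pre_ (outside Pre_ the Python A raises IndexError).

-- ===== PORT A =====
-- 'for i in range(len(feature[0][1]))'; the inner 'for j in range(len(feature))' reads
-- feature[j][1][i] and is ported as a fold over feature itself (j runs over exactly the
-- rows in order); feature[j][1][i] is pyGetD with default 0, in range under Pre_.
def noise_pos (feature : List (Int × List Int)) (thres : Int) : List Int :=
  let k := (feature.headD (0, [])).2.length   -- len(feature[0][1]); feature[0] raises on [] (excluded by Pre_)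
  (List.range k).foldl (fun (n_pos : List Int) (i : Nat) =>
    let st := feature.foldl
      (fun (st : Int × Int) p =>
        (max (PySem.List.pyGetD p.2 (i : Int) 0) st.1, st.2 + PySem.List.pyGetD p.2 (i : Int) 0))
      ((0 : Int), (0 : Int))
    if st.1 < thres then n_pos ++ [(i : Int)] else n_pos) []

-- ===== PORT B =====
-- the row loop of Source B: break when candidates is empty, else keep the candidates whose
-- count in this row is below the threshold (counts[i] is pyGetD, in range under Pre_)
def npSieve (thres : Int) : List (Int × List Int) → List Int → List Int
  | [], cands => cands
  | p :: fs, cands =>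
      if cands = [] then []
      else npSieve thres fs (cands.filter (fun i => PySem.List.pyGetD p.2 i 0 < thres))

-- candidates = list(range(len(feature[0][1]))); if thres <= 0: return []; row loop; return candidates
def noise_pos_alt (feature : List (Int × List Int)) (thres : Int) : List Int :=
  let cands := (List.range (feature.headD (0, [])).2.length).map (fun (i : Nat) => (i : Int))
  if thres ≤ 0 then [] else npSieve thres feature cands

-- ===== PRECONDITION & SPEC =====
-- Pre_ excludes exactly the inputs where Python A raises IndexError: the empty feature
-- list (feature[0]) and ragged inputs where some row is shorter than the first row.
def Pre_noise_pos (feature : List (Int × List Int)) (thres : Int) : Prop :=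
  feature ≠ [] ∧ ∀ p ∈ feature, (feature.headD (0, [])).2.length ≤ p.2.length
instance (feature : List (Int × List Int)) (thres : Int) : Decidable (Pre_noise_pos feature thres) := by unfold Pre_noise_pos; infer_instance

def pvWitness_noise_pos : (List (Int × List Int)) × Int := ([(1, [3, 0]), (2, [1, 5])], 4)

def Spec_noise_pos (feature : List (Int × List Int)) (thres : Int) (out : List Int) : Prop := out = noise_pos_alt feature thres
instance (feature : List (Int × List Int)) (thres : Int) (out : List Int) : Decidable (Spec_noise_pos feature thres out) := by unfold Spec_noise_pos; infer_instance

-- ===== CLAIM (what is proved, stated in full; the proofs are below) =====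
def Claim_equal_noise_pos : Prop := ∀ (feature : List (Int × List Int)) (thres : Int), Dom_noise_pos feature thres → Pre_noise_pos feature thres → Spec_noise_pos feature thres (noise_pos feature thres)

-- ===== LEMMAS AND PROOFS =====

-- A's pair fold: the first component is the plain max fold (count is dead state)
lemma A_fst (v : (Int × List Int) → Int) : ∀ (fs : List (Int × List Int)) (a c : Int),
    (fs.foldl (fun (st : Int × Int) p => (max (v p) st.1, st.2 + v p)) (a, c)).1
      = fs.foldl (fun m p => max m (v p)) a := by
  intro fs
  induction fs with
  | nil => intro a c; simp
  | cons p fs ih =>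
      intro a c
      simp only [List.foldl_cons]
      rw [ih, max_comm]

-- A's outer loop is a filter-then-map
lemma A_shape (q : Nat → Prop) [DecidablePred q] :
    ∀ (l : List Nat) (acc : List Int),
    l.foldl (fun n_pos i => if q i then n_pos ++ [(i : Int)] else n_pos) acc
      = acc ++ (l.filter (fun i => decide (q i))).map (fun (i : Nat) => (i : Int)) := by
  intro l
  induction l with
  | nil => intro acc; simp
  | cons x l ih =>
      intro acc
      simp only [List.foldl_cons, List.filter_cons]
      by_cases h : q x
      · simp [h, ih]
      · simp [h, ih]

-- the max fold is below t iff the seed and every row value are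
lemma maxfold_lt (v : (Int × List Int) → Int) :
    ∀ (fs : List (Int × List Int)) (a t : Int),
    (fs.foldl (fun m p => max m (v p)) a < t)
      ↔ (a < t ∧ fs.all (fun p => decide (v p < t)) = true) := by
  intro fs
  induction fs with
  | nil => intro a t; simp
  | cons p fs ih =>
      intro a t
      simp only [List.foldl_cons, List.all_cons]
      rw [ih]
      constructor
      · rintro ⟨h1, h2⟩
        rw [max_lt_iff] at h1
        exact ⟨h1.1, by simp [h1.2, h2]⟩
      · rintro ⟨h1, h2⟩
        simp only [Bool.and_eq_true, decide_eq_true_eq] at h2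
        exact ⟨max_lt h1 h2.1, h2.2⟩

-- the sieve loop (with its early break) computes a plain filter over the candidates
lemma npSieve_eq (thres : Int) : ∀ (fs : List (Int × List Int)) (cands : List Int),
    npSieve thres fs cands
      = cands.filter (fun i => fs.all (fun p => decide (PySem.List.pyGetD p.2 i 0 < thres))) := by
  intro fs
  induction fs with
  | nil => intro cands; simp [npSieve]
  | cons p fs ih =>
      intro cands
      rw [npSieve]
      by_cases h : cands = []
      · subst h; simp
      · rw [if_neg h, ih, List.filter_filter]
        apply List.filter_congr
        intro i _
        simp [Bool.and_comm]

-- filter after map Int = map Int after filter on Nat indices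
lemma filter_map_cast (p : Int → Bool) (l : List Nat) :
    (l.map (fun (i : Nat) => (i : Int))).filter p
      = (l.filter (fun (i : Nat) => p (i : Int))).map (fun (i : Nat) => (i : Int)) := by
  rw [List.filter_map]; rfl

-- the two ports agree on every input of the port types
lemma noise_pos_eq_alt (feature : List (Int × List Int)) (thres : Int) :
    noise_pos feature thres = noise_pos_alt feature thres := by
  simp only [noise_pos, noise_pos_alt]
  set k := (feature.headD (0, [])).2.length with hk
  rw [A_shape (fun i => (feature.foldl
        (fun (st : Int × Int) p =>
          (max (PySem.List.pyGetD p.2 (i : Int) 0) st.1, st.2 + PySem.List.pyGetD p.2 (i : Int) 0))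
        ((0 : Int), (0 : Int))).1 < thres), List.nil_append]
  rw [npSieve_eq, filter_map_cast]
  by_cases ht : thres ≤ 0
  · rw [if_pos ht]
    have : ∀ i ∈ List.range k,
        (decide ((feature.foldl
          (fun (st : Int × Int) p =>
            (max (PySem.List.pyGetD p.2 (i : Int) 0) st.1, st.2 + PySem.List.pyGetD p.2 (i : Int) 0))
          ((0 : Int), (0 : Int))).1 < thres)) = false := by
      intro i _
      rw [A_fst (fun p => PySem.List.pyGetD p.2 (i : Int) 0)]
      simp only [decide_eq_false_iff_not, maxfold_lt]
      intro h
      omega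
    rw [List.filter_congr this]
    simp
  · rw [if_neg ht]
    refine congrArg _ (List.filter_congr ?_)
    intro i hi
    rw [A_fst (fun p => PySem.List.pyGetD p.2 (i : Int) 0)]
    have := maxfold_lt (fun p => PySem.List.pyGetD p.2 (i : Int) 0) feature 0 thres
    simp only [this]
    have h0 : (0 : Int) < thres := by omega
    simp [h0]

-- ===== VERDICT (by name: the statement is the Claim_ definition above) =====
theorem noise_pos_spec : Claim_equal_noise_pos := by
  intro feature thres _ _
  unfold Spec_noise_pos
  exact noise_pos_eq_alt feature thres
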